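-- pv_equiv track=rewrite | github.com/Abercus/devmining_utilities | utils.py | check_sequence_nonstrict_order
-- ===== SOURCE A (Python) =====
-- from typing import List
-- import itertools
--
-- def check_sequence_nonstrict_order(
--     trace,
--     sequence: List[str],
--     count: int = 1,
--     hack_delim: str = "␟",
--     name: str = "concept:name",
-- ):
--     """
--     Check if sequence exists in the trace at least count times. Non-strict sequence
--
--     Input is normal trace, no reverse index
--     """
--
--     if len(trace) < count:
--         return 0
--
--     tested_permutations = set()
--     # Get all unique orders of inp sequence
--
--     search_list = [event[name] for event in trace]
--
--     found_indices = []
--     # Try every unique permutation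
--     for perm_seq in itertools.permutations(sequence):
--         if perm_seq in tested_permutations:
--             continue
--         tested_permutations.add(perm_seq)
--
--         #  Very non-performant way of implementing string-search stuff.. For longer sequences could use sth similar to Boyer-Moore, KMP, Horspool.
--         for i in range(len(search_list) - len(sequence)):
--             if tuple(search_list[i : i + len(sequence)]) == perm_seq:
--                 found_indices.append(i)
--
--     # If not enough found indices, then shorcircuit.
--     if len(found_indices) < count:
--         return 0
--
--     # Get rid of indice overlaps, keep the earliest to maximize (greedy, should be fine)
--     #  Remove duplicates and sort
--     found_indices = sorted(list(set(found_indices)))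
--
--     # Filter out remaining. Must keep gap of at least len(sequence) - not true, because textual strings are longer.
--     filtered_indices = [found_indices[0]]
--     next_min_index = found_indices[0] + len(sequence)
--     for i in range(1, len(found_indices)):
--         next_ind = found_indices[i]
--         if next_ind >= next_min_index:
--             filtered_indices.append(next_ind)
--             next_min_index = next_ind + len(sequence)
--
--     if len(filtered_indices) >= count:
--         return 2
--
--     return 0
-- ===== SOURCE B (Python) =====
-- def check_sequence_nonstrict_order(
--     trace,
--     sequence,
--     count=1,
--     hack_delim="\u241f",
--     name="concept:name",
-- ):
--     """Single pass comparing each window as a multiset (sorted) with on-the-fly greedy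
--     non-overlap counting -- no permutation enumeration."""
--     if len(trace) < count:
--         return 0
--
--     names = [event[name] for event in trace]
--     k = len(sequence)
--     target = sorted(sequence)
--
--     matched = 0
--     next_free = 0
--     # examine the same window starts as the original (0 .. n-k-1)
--     for i in range(len(names) - k):
--         if i >= next_free and sorted(names[i:i + k]) == target:
--             matched += 1
--             next_free = i + k
--
--     return 2 if matched >= count else 0
-- ===== Notes on version B (the rewrite author's own statement) =====
-- stated objective: alternative
-- what changed: Instead of enumerating every unique permutation of `sequence` and scanning the whole trace once per permutation, then sorting/deduplicating and greedily filtering the collected indices, B makes a single pass over the window starts, compares sorted(window) with sorted(sequence) (multiset equality) and counts non-overlapping hits greedily on the fly.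
import Mathlib
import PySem

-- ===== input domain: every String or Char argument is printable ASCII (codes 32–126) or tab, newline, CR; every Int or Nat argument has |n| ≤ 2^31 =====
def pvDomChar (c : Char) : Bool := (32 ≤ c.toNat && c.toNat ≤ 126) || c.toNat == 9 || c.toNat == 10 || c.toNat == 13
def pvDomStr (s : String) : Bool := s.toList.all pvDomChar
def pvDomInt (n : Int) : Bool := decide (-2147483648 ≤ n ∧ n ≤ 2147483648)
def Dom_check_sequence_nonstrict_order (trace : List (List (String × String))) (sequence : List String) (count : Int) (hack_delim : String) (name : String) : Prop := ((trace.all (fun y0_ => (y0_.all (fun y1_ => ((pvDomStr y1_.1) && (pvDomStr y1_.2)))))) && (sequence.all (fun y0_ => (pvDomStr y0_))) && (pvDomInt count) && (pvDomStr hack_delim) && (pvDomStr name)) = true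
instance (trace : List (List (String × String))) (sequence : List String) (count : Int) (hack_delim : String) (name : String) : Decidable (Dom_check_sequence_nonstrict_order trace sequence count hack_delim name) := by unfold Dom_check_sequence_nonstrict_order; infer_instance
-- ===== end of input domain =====

-- B replaces A's enumeration of all k! permutations (each scanned against every window)
-- by one pass over the windows comparing sorted(window) with sorted(sequence), counting
-- non-overlapping hits greedily on the fly; same return value on every input of Pre_.

-- ===== PORT A =====
-- inner loop: for i in range(len(search_list)-len(sequence)): if tuple(...) == perm_seq: found_indices.append(i)
def pvMatchesA (search : List String) (k : Int) (perm : List String) (found : List Int) : List Int :=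
  (PySem.List.pyRange 0 ((search.length : Int) - k)).foldl
    (fun acc i => if PySem.List.slice search (some i) (some (i + k)) = perm then acc ++ [i] else acc)
    found

-- one step of the outer 'for perm_seq in itertools.permutations(sequence)' loop with tested_permutations
def pvPermStep (search : List String) (k : Int) (st : PySem.Set (List String) × List Int)
    (perm : List String) : PySem.Set (List String) × List Int :=
  if PySem.Set.contains st.1 perm then st
  else (PySem.Set.add st.1 perm, pvMatchesA search k perm st.2)

-- greedy filter step: if next_ind >= next_min_index: filtered.append(next_ind); next_min_index = next_ind + len(sequence)
def pvGreedyStepA (k : Int) (st : List Int × Int) (next : Int) : List Int × Int :=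
  if next ≥ st.2 then (st.1 ++ [next], next + k) else st

-- itertools.permutations(sequence) ported as PySem.List.permutations (CPython's tuple order differs
-- from no order used downstream: found_indices is consumed as sorted(set(...)), so exact for the result)
def check_sequence_nonstrict_order (trace : List (List (String × String))) (sequence : List String) (count : Int) (hack_delim : String) (name : String) : Int :=
  if (trace.length : Int) < count then 0
  else
    -- event[name]: KeyError on a missing key is excluded by Pre_; getD "" is never the value used there
    let search_list : List String := trace.map (fun e => PySem.Dict.getD (PySem.Dict.mk e) name "")
    let found_indices :=
      ((PySem.List.permutations sequence sequence.length).foldl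
        (pvPermStep search_list (sequence.length : Int)) (PySem.Set.empty, [])).2
    if (found_indices.length : Int) < count then 0
    else
      match PySem.List.sorted (PySem.Set.ofList found_indices) (fun x => x) with
      | [] => 0   -- Python raises IndexError (found_indices[0]) here; these inputs are outside Pre_
      | f0 :: rest =>
        let filtered :=
          (rest.foldl (pvGreedyStepA (sequence.length : Int)) ([f0], f0 + (sequence.length : Int))).1
        if (filtered.length : Int) ≥ count then 2 else 0

-- ===== PORT B =====
-- loop body: if i >= next_free and sorted(names[i:i+k]) == target: matched += 1; next_free = i + k
def pvCountStep (names : List String) (k : Int) (target : List String) (st : Int × Int) (i : Int) : Int × Int :=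
  if i ≥ st.2 ∧ PySem.List.sorted (PySem.List.slice names (some i) (some (i + k))) (fun x => x) = target
  then (st.1 + 1, i + k) else st

def check_sequence_nonstrict_order_alt (trace : List (List (String × String))) (sequence : List String) (count : Int) (hack_delim : String) (name : String) : Int :=
  if (trace.length : Int) < count then 0
  else
    let names : List String := trace.map (fun e => PySem.Dict.getD (PySem.Dict.mk e) name "")
    let k : Int := (sequence.length : Int)
    let target := PySem.List.sorted sequence (fun x => x)
    let st :=
      (PySem.List.pyRange 0 ((names.length : Int) - k)).foldl (pvCountStep names k target) (0, 0)
    if st.1 ≥ count then 2 else 0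

-- ===== PRECONDITION & SPEC =====
-- Pre_ excludes exactly the inputs where the Python A raises: a KeyError (some event lacks the key
-- `name`, reached whenever len(trace) >= count) and the IndexError found_indices[0] (count <= 0 while
-- no window of the trace is a permutation of `sequence`).
def Pre_check_sequence_nonstrict_order (trace : List (List (String × String))) (sequence : List String) (count : Int) (hack_delim : String) (name : String) : Prop :=
  (trace.length : Int) < count ∨
  ((∀ e ∈ trace, PySem.Dict.contains (PySem.Dict.mk e) name = true) ∧
   (1 ≤ count ∨
    ∃ i ∈ PySem.List.pyRange 0 ((trace.length : Int) - sequence.length),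
      (PySem.List.slice (trace.map (fun e => PySem.Dict.getD (PySem.Dict.mk e) name ""))
          (some i) (some (i + sequence.length))).Perm sequence))
instance (trace : List (List (String × String))) (sequence : List String) (count : Int) (hack_delim : String) (name : String) : Decidable (Pre_check_sequence_nonstrict_order trace sequence count hack_delim name) := by unfold Pre_check_sequence_nonstrict_order; infer_instance

def pvWitness_check_sequence_nonstrict_order : (List (List (String × String))) × List String × Int × String × String :=
  ([[("concept:name", "b")], [("concept:name", "a")]], ["a", "b"], 1, "|", "concept:name")

def Spec_check_sequence_nonstrict_order (trace : List (List (String × String))) (sequence : List String) (count : Int) (hack_delim : String) (name : String) (out : Int) : Prop := out = check_sequence_nonstrict_order_alt trace sequence count hack_delim name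
instance (trace : List (List (String × String))) (sequence : List String) (count : Int) (hack_delim : String) (name : String) (out : Int) : Decidable (Spec_check_sequence_nonstrict_order trace sequence count hack_delim name out) := by unfold Spec_check_sequence_nonstrict_order; infer_instance

-- ===== CLAIM (what is proved, stated in full; the proofs are below) =====
def Claim_equal_check_sequence_nonstrict_order : Prop := ∀ (trace : List (List (String × String))) (sequence : List String) (count : Int) (hack_delim : String) (name : String), Dom_check_sequence_nonstrict_order trace sequence count hack_delim name → Pre_check_sequence_nonstrict_order trace sequence count hack_delim name → Spec_check_sequence_nonstrict_order trace sequence count hack_delim name (check_sequence_nonstrict_order trace sequence count hack_delim name)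

-- ===== LEMMAS AND PROOFS =====

-- unfolding equation for PySem.List.permutations at a successor (definitional)
lemma pv_permutations_succ {α : Type} (xs : List α) (r : Nat) :
    PySem.List.permutations xs (r + 1) =
      (List.range xs.length).flatMap
        (fun i => match xs[i]? with
          | none => []
          | some a => (PySem.List.permutations (xs.eraseIdx i) r).map (fun p => a :: p)) := rfl

-- converse of PySem.List.perm_of_mem_permutations
lemma pv_mem_permutations_of_perm {α : Type} :
    ∀ (p xs : List α), p.Perm xs → p ∈ PySem.List.permutations xs xs.length := by
  intro p
  induction p with
  | nil =>
    intro xs h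
    have hx : xs = [] := h.symm.eq_nil
    subst hx
    simp [PySem.List.permutations_zero]
  | cons a q ih =>
    intro xs h
    have ha : a ∈ xs := h.subset (List.mem_cons_self)
    obtain ⟨i, hi, hEq⟩ := List.mem_iff_getElem.mp ha
    have hperm : xs.Perm (a :: xs.eraseIdx i) := by
      have h2 := (List.getElem_cons_eraseIdx_perm hi).symm
      rwa [hEq] at h2
    have hq : q.Perm (xs.eraseIdx i) := (h.trans hperm).cons_inv
    have hxl : xs.length = q.length + 1 := by
      have := h.length_eq; simpa using this.symm
    rw [hxl, pv_permutations_succ]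
    simp only [List.mem_flatMap, List.mem_range]
    refine ⟨i, by omega, ?_⟩
    have hsome : xs[i]? = some a := by rw [List.getElem?_eq_getElem hi, hEq]
    rw [hsome]
    simp only [List.mem_map]
    refine ⟨q, ?_, rfl⟩
    have hlen : (xs.eraseIdx i).length = q.length := by
      rw [List.length_eraseIdx_of_lt hi]; omega
    have := ih (xs.eraseIdx i) hq
    rwa [hlen] at this

lemma pvMatchesA_eq (search : List String) (k : Int) (perm : List String) (found : List Int) :
    pvMatchesA search k perm found =
      found ++ (PySem.List.pyRange 0 ((search.length : Int) - k)).filter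
        (fun i => decide (PySem.List.slice search (some i) (some (i + k)) = perm)) := by
  unfold pvMatchesA
  exact PySem.List.foldl_append_ite_eq_filter _ _ _

-- membership in the found_indices accumulated by the permutation loop
lemma pvPermFold_mem (search : List String) (k : Int) :
    ∀ (perms : List (List String)) (tested : PySem.Set (List String)) (found : List Int) (j : Int),
      (j ∈ (perms.foldl (pvPermStep search k) (tested, found)).2) ↔
        (j ∈ found ∨ ∃ p ∈ perms, p ∉ tested ∧
          j ∈ PySem.List.pyRange 0 ((search.length : Int) - k) ∧
          PySem.List.slice search (some j) (some (j + k)) = p) := by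
  intro perms
  induction perms with
  | nil => intro tested found j; simp
  | cons p ps ih =>
    intro tested found j
    simp only [List.foldl_cons]
    by_cases hc : p ∈ tested
    · have hstep : pvPermStep search k (tested, found) p = (tested, found) := by
        unfold pvPermStep
        rw [if_pos (show PySem.Set.contains (tested, found).1 p = true from
          (PySem.Set.contains_iff tested p).mpr hc)]
      rw [hstep, ih]
      constructor
      · rintro (hf | ⟨q, hq, hnt, hr, hs⟩)
        · exact Or.inl hf
        · exact Or.inr ⟨q, List.mem_cons_of_mem _ hq, hnt, hr, hs⟩
      · rintro (hf | ⟨q, hq, hnt, hr, hs⟩)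
        · exact Or.inl hf
        · rcases List.mem_cons.mp hq with rfl | hq'
          · exact absurd hc hnt
          · exact Or.inr ⟨q, hq', hnt, hr, hs⟩
    · have hstep : pvPermStep search k (tested, found) p =
          (PySem.Set.add tested p, pvMatchesA search k p found) := by
        unfold pvPermStep
        rw [if_neg (show ¬ PySem.Set.contains (tested, found).1 p = true from
          fun h => hc ((PySem.Set.contains_iff tested p).mp h))]
      rw [hstep, ih, pvMatchesA_eq]
      simp only [List.mem_append, List.mem_filter, decide_eq_true_eq, PySem.Set.mem_add]
      constructor
      · rintro ((hf | ⟨hr, hs⟩) | ⟨q, hq, hnt, hr, hs⟩)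
        · exact Or.inl hf
        · exact Or.inr ⟨p, List.mem_cons_self, hc, hr, hs⟩
        · exact Or.inr ⟨q, List.mem_cons_of_mem _ hq, fun h => hnt (Or.inl h), hr, hs⟩
      · rintro (hf | ⟨q, hq, hnt, hr, hs⟩)
        · exact Or.inl (Or.inl hf)
        · rcases List.mem_cons.mp hq with rfl | hq'
          · exact Or.inl (Or.inr ⟨hr, hs⟩)
          · by_cases hqp : q = p
            · subst hqp; exact Or.inl (Or.inr ⟨hr, hs⟩)
            · exact Or.inr ⟨q, hq', fun h => (h.elim hnt hqp), hr, hs⟩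

-- the full characterisation of A's found_indices: exactly the window starts whose window permutes `sequence`
lemma pvFound_char (search : List String) (sequence : List String) (j : Int) :
    (j ∈ ((PySem.List.permutations sequence sequence.length).foldl
        (pvPermStep search (sequence.length : Int)) (PySem.Set.empty, [])).2) ↔
      (j ∈ PySem.List.pyRange 0 ((search.length : Int) - sequence.length) ∧
       (PySem.List.slice search (some j) (some (j + sequence.length))).Perm sequence) := by
  rw [pvPermFold_mem]
  constructor
  · rintro (hf | ⟨p, hp, _, hr, hs⟩)
    · simp at hf
    · exact ⟨hr, hs ▸ PySem.List.perm_of_mem_permutations hp⟩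
  · rintro ⟨hr, hperm⟩
    refine Or.inr ⟨PySem.List.slice search (some j) (some (j + sequence.length)), ?_, ?_, hr, rfl⟩
    · exact pv_mem_permutations_of_perm _ _ hperm
    · simp [PySem.Set.empty]

-- B's counting loop restricted to the matching window starts
lemma pvCount_eq_filter (names : List String) (sequence : List String) (init : Int × Int) :
    (PySem.List.pyRange 0 ((names.length : Int) - sequence.length)).foldl
        (pvCountStep names (sequence.length : Int) (PySem.List.sorted sequence (fun x => x))) init
      = ((PySem.List.pyRange 0 ((names.length : Int) - sequence.length)).filter
          (fun i => decide ((PySem.List.slice names (some i) (some (i + sequence.length))).Perm sequence))).foldl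
          (fun st i => if i ≥ st.2 then (st.1 + 1, i + (sequence.length : Int)) else st) init := by
  rw [PySem.List.foldl_congr_mem _ _
    (fun st i => if (PySem.List.slice names (some i) (some (i + sequence.length))).Perm sequence
      then (if i ≥ st.2 then (st.1 + 1, i + (sequence.length : Int)) else st) else st) _ ?_]
  · exact PySem.List.foldl_ite_eq_foldl_filter _ _ _ _
  · intro st i _
    unfold pvCountStep
    by_cases hp : (PySem.List.slice names (some i) (some (i + sequence.length))).Perm sequence
    · have hs : PySem.List.sorted (PySem.List.slice names (some i) (some (i + sequence.length))) (fun x => x)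
          = PySem.List.sorted sequence (fun x => x) :=
        (PySem.List.sorted_id_eq_sorted_id_iff_perm _ _).mpr hp
      simp [hs, hp]
    · have hs : PySem.List.sorted (PySem.List.slice names (some i) (some (i + sequence.length))) (fun x => x)
          ≠ PySem.List.sorted sequence (fun x => x) := by
        intro h; exact hp ((PySem.List.sorted_id_eq_sorted_id_iff_perm _ _).mp h)
      simp [hs, hp]

-- the greedy pass of B counts exactly the elements A's greedy pass collects
lemma pvGreedy_len (k : Int) :
    ∀ (l : List Int) (acc : List Int) (nm : Int),
      l.foldl (fun st i => if i ≥ st.2 then (st.1 + 1, i + k) else st) ((acc.length : Int), nm)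
        = (((l.foldl (pvGreedyStepA k) (acc, nm)).1.length : Int),
           (l.foldl (pvGreedyStepA k) (acc, nm)).2) := by
  intro l
  induction l with
  | nil => intro acc nm; simp
  | cons x t ih =>
    intro acc nm
    simp only [List.foldl_cons, pvGreedyStepA]
    by_cases h : x ≥ nm
    · rw [if_pos h, if_pos h]
      have : ((acc ++ [x]).length : Int) = (acc.length : Int) + 1 := by simp
      rw [← this, ih]
    · rw [if_neg h, if_neg h]
      exact ih acc nm

-- the count of B's greedy pass is bounded by the number of matching windows
lemma pvGreedy_count_le (k : Int) :
    ∀ (l : List Int) (c nm : Int),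
      (l.foldl (fun st i => if i ≥ st.2 then (st.1 + 1, i + k) else st) (c, nm)).1 ≤ c + l.length := by
  intro l
  induction l with
  | nil => intro c nm; simp
  | cons x t ih =>
    intro c nm
    simp only [List.foldl_cons, List.length_cons]
    by_cases h : x ≥ nm
    · rw [if_pos h]
      have := ih (c + 1) (x + k)
      push_cast at *; omega
    · rw [if_neg h]
      have := ih c nm
      push_cast at *; omega

-- sorted(set(found_indices)) is exactly the ascending list of matching window starts
lemma pvSortedFound_eq (search : List String) (sequence : List String) :
    PySem.List.sorted
        (PySem.Set.ofList (((PySem.List.permutations sequence sequence.length).foldl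
          (pvPermStep search (sequence.length : Int)) (PySem.Set.empty, [])).2)) (fun x => x)
      = (PySem.List.pyRange 0 ((search.length : Int) - sequence.length)).filter
          (fun i => decide ((PySem.List.slice search (some i) (some (i + sequence.length))).Perm sequence)) := by
  apply PySem.List.sorted_eq_of_perm_of_pairwise_lt
  · rw [List.perm_ext_iff_of_nodup
      (List.Nodup.filter _ (PySem.List.nodup_pyRange_one 0 _))
      (PySem.Set.nodup_ofList _)]
    intro j
    rw [PySem.Set.mem_ofList, pvFound_char]
    simp [List.mem_filter]
  · exact List.Pairwise.filter _ (PySem.List.pairwise_lt_pyRange_one 0 _)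

-- ===== VERDICT helper: the main equivalence =====
theorem check_sequence_nonstrict_order_spec : Claim_equal_check_sequence_nonstrict_order := by
  intro trace sequence count hack_delim name _hDom hPre
  unfold Spec_check_sequence_nonstrict_order
  unfold check_sequence_nonstrict_order check_sequence_nonstrict_order_alt
  dsimp only
  by_cases h1 : (trace.length : Int) < count
  · rw [if_pos h1, if_pos h1]
  · rw [if_neg h1, if_neg h1]
    set search : List String := trace.map (fun e => PySem.Dict.getD (PySem.Dict.mk e) name "") with hsearch
    have hslen : search.length = trace.length := by simp [hsearch]
    set found : List Int := ((PySem.List.permutations sequence sequence.length).foldl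
      (pvPermStep search (sequence.length : Int)) (PySem.Set.empty, [])).2 with hfound
    set F : List Int := (PySem.List.pyRange 0 ((search.length : Int) - sequence.length)).filter
      (fun i => decide ((PySem.List.slice search (some i) (some (i + sequence.length))).Perm sequence)) with hF
    have hsorted : PySem.List.sorted (PySem.Set.ofList found) (fun x => x) = F :=
      pvSortedFound_eq search sequence
    have hBcount : (PySem.List.pyRange 0 ((search.length : Int) - sequence.length)).foldl
        (pvCountStep search (sequence.length : Int) (PySem.List.sorted sequence (fun x => x))) ((0 : Int), (0 : Int))
        = F.foldl (fun st i => if i ≥ st.2 then (st.1 + 1, i + (sequence.length : Int)) else st) (0, 0) :=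
      pvCount_eq_filter search sequence (0, 0)
    rw [hBcount]
    have hFlen : F.length ≤ found.length := by
      calc F.length = (PySem.List.sorted (PySem.Set.ofList found) (fun x => x)).length := by rw [hsorted]
        _ = (PySem.Set.ofList found).length := PySem.List.length_sorted _ _ _
        _ ≤ found.length := PySem.Set.length_ofList_le _
    rcases hFeq : F with _ | ⟨f0, rest⟩
    · -- no matching window at all
      have hfound_nil : found = [] := by
        rw [List.eq_nil_iff_forall_not_mem]
        intro j hj
        have := (pvFound_char search sequence j).mp hj
        have hjF : j ∈ F := by
          rw [hF, List.mem_filter]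
          exact ⟨this.1, by simp [this.2]⟩
        rw [hFeq] at hjF; exact absurd hjF (List.not_mem_nil)
      have hc1 : 1 ≤ count := by
        rcases hPre with h | ⟨_, hc | ⟨i, hiR, hiP⟩⟩
        · exact absurd h h1
        · exact hc
        · exfalso
          have hjF : i ∈ F := by
            rw [hF, List.mem_filter]
            constructor
            · rwa [hslen]
            · simpa using hiP
          rw [hFeq] at hjF; exact absurd hjF (List.not_mem_nil)
      rw [hfound_nil]
      rw [if_pos (by simpa using hc1)]
      simp only [List.foldl_nil]
      rw [if_neg (by omega)]
    · -- at least one matching window; A takes the f0 :: rest branch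
      have hf0F : f0 ∈ F := by rw [hFeq]; exact List.mem_cons_self
      have hf0R : f0 ∈ PySem.List.pyRange 0 ((search.length : Int) - sequence.length) := by
        rw [hF] at hf0F; exact List.mem_of_mem_filter hf0F
      have hf0nn : (0 : Int) ≤ f0 := (PySem.List.mem_pyRange_one.mp hf0R).1
      rw [hsorted, hFeq]
      simp only [List.foldl_cons]
      rw [if_pos hf0nn]
      have hstep1 : ((0 : Int) + 1, f0 + (sequence.length : Int))
          = ((([f0] : List Int).length : Int), f0 + (sequence.length : Int)) := by simp
      rw [hstep1, pvGreedy_len]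
      by_cases h2 : (found.length : Int) < count
      · rw [if_pos h2]
        rw [if_neg ?_]
        intro hge
        have hbound := pvGreedy_count_le (sequence.length : Int) rest 1 (f0 + (sequence.length : Int))
        have h3 := pvGreedy_len (sequence.length : Int) rest [f0] (f0 + (sequence.length : Int))
        have hrest : (rest.length : Int) + 1 ≤ (found.length : Int) := by
          have : F.length = rest.length + 1 := by rw [hFeq]; simp
          have := hFlen; omega
        rw [show (([f0] : List Int).length : Int) = 1 by simp] at h3
        rw [h3] at hbound
        omega
      · rw [if_neg h2]

-- ===== VERDICT =====
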